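-- pv_equiv track=rewrite | github.com/TheFenrisLycaon/DSA-C-- | daily_problems/GeeksForGeeks/0315.py | count
-- ===== SOURCE A (Python) =====
-- from typing import List
--
-- def count(N: int, A: List[int], X: int):
--     res = 9223372036854775807
--     curr = 0
--     for i in range(31, -1, -1):
--         if (X >> i) & 1:
--             curr |= 1 << i
--             continue
--         temp = curr | (1 << i)
--         k = len(list(filter(lambda x: x & temp == temp, A)))
--         res = min(res, N - k)
--     return res
-- ===== SOURCE B (Python) =====
-- def count(N, A, X):
--     # Transposed computation: one element-major pass accumulates, for every bit
--     # position, how many elements contain that position's required mask (walking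
--     # each element's bits from high to low with an early break at the first
--     # missing required bit); the answer is N minus the largest counter among
--     # X's zero bit positions (or INT64_MAX if X's low 32 bits are all ones).
--     counts = [0] * 32
--     for x in A:
--         for i in range(31, -1, -1):
--             if (X >> i) & 1:
--                 if not (x >> i) & 1:
--                     break
--             elif (x >> i) & 1:
--                 counts[i] += 1
--     zero_bits = [i for i in range(32) if not (X >> i) & 1]
--     if not zero_bits:
--         return 9223372036854775807
--     return N - max(counts[i] for i in zero_bits)
-- ===== Notes on version B (the rewrite author's own statement) =====
-- stated objective: alternative
-- what changed: Transposes the loops: instead of per-bit filtering of A under a running OR-mask with a running min, B makes one element-major pass that accumulates per-bit-position counters (walking each element's bits high-to-low with an early break at the first missing required bit) and then recovers the answer as N minus the maximum counter over X's zero bit positions.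
import Mathlib
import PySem

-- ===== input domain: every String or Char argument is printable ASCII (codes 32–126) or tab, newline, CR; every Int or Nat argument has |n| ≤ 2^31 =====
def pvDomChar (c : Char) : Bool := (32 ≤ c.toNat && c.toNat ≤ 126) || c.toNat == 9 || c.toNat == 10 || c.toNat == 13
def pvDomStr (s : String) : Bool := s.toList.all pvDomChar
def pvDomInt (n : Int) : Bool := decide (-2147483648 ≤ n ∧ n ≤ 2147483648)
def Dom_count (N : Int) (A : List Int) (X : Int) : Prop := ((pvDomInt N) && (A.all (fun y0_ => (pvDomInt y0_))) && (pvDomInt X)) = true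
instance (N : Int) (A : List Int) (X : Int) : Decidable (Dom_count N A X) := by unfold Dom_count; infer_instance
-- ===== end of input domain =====

-- B transposes the computation: one element-major pass with per-bit-position counters
-- (early break at the first missing required bit) and a final N - max over X's zero
-- bits, instead of A's per-bit filtering under a running OR-mask with a running min:
-- alternative decomposition, same cost.

-- ===== PORT A =====
def count (N : Int) (A : List Int) (X : Int) : Int :=
  let st := (PySem.List.pyRange 31 (-1) (-1)).foldl
    (fun (s : Int × Int) (i : Int) =>
      if PySem.Int.band (X >>> i.toNat) 1 ≠ 0 then
        (s.1, PySem.Int.bor s.2 ((1 : Int) <<< i.toNat))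
      else
        let temp := PySem.Int.bor s.2 ((1 : Int) <<< i.toNat)
        let k := (A.filter (fun x => PySem.Int.band x temp = temp)).length
        (min s.1 (N - (k : Int)), s.2))
    ((9223372036854775807 : Int), (0 : Int))
  st.1

-- ===== PORT B =====
-- inner loop of B: `for i in range(31, -1, -1): …` over one element x, with the break;
-- fuel n means bit positions n-1, …, 0 remain.
def goBit (X x : Int) : Nat → List Int → List Int
  | 0, counts => counts
  | n + 1, counts =>
    if PySem.Int.band (X >>> n) 1 ≠ 0 then
      if PySem.Int.band (x >>> n) 1 = 0 then counts   -- break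
      else goBit X x n counts
    else if PySem.Int.band (x >>> n) 1 ≠ 0 then
      goBit X x n (counts.set n (counts.getD n 0 + 1))
    else goBit X x n counts

def count_alt (N : Int) (A : List Int) (X : Int) : Int :=
  let counts := A.foldl (fun c x => goBit X x 32 c) (List.replicate 32 (0 : Int))
  let zs := (PySem.List.pyRange 0 32 1).filter (fun i => PySem.Int.band (X >>> i.toNat) 1 = 0)
  if zs = [] then 9223372036854775807
  else
    match PySem.List.max? (zs.map (fun i => counts.getD i.toNat 0)) (fun k => k) with
    | none => 9223372036854775807   -- unreachable: zs ≠ []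
    | some m => N - m

-- ===== PRECONDITION & SPEC =====
def Spec_count (N : Int) (A : List Int) (X : Int) (out : Int) : Prop := out = count_alt N A X
instance (N : Int) (A : List Int) (X : Int) (out : Int) : Decidable (Spec_count N A X out) := by unfold Spec_count; infer_instance

-- ===== CLAIM (what is proved, stated in full; the proofs are below) =====
def Claim_equal_count : Prop := ∀ (N : Int) (A : List Int) (X : Int), Dom_count N A X → Spec_count N A X (count N A X)

-- ===== LEMMAS AND PROOFS =====

/-- X's low 32 bits, as Python's `X & 0xFFFFFFFF`. -/
def pvXm (X : Int) : Int := PySem.Int.band X 4294967295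

/-- The value A's `curr` holds when the loop reaches bit n-1: bits ≥ n of `pvXm X`. -/
def pvHi (X : Int) (n : Nat) : Int := 2 ^ n * (pvXm X / 2 ^ n)

/-- The mask A tests at a zero bit i: X's bits above i plus bit i. -/
def pvTemp (X : Int) (i : Nat) : Int := pvHi X (i + 1) + 2 ^ i

/-- N minus the count of elements of A containing the mask for bit i. -/
def pvVal (N : Int) (A : List Int) (X : Int) (i : Nat) : Int :=
  N - ((A.filter (fun x => PySem.Int.band x (pvTemp X i) = pvTemp X i)).length : Int)

/-- The candidate contributed at bit i (none when bit i of X is set). -/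
def pvSel (N : Int) (A : List Int) (X : Int) (i : Nat) : Option Int :=
  if pvXm X / 2 ^ i % 2 = 1 then none else some (pvVal N A X i)

/-- The index list of A's loop: [n-1, …, 0]. -/
def pvDesc : Nat → List Int
  | 0 => []
  | n + 1 => (n : Int) :: pvDesc n

/-- The candidates produced at bits n-1, …, 0, in that (descending) order. -/
def pvCands (N : Int) (A : List Int) (X : Int) : Nat → List Int
  | 0 => []
  | n + 1 =>
    match pvSel N A X n with
    | none => pvCands N A X n
    | some v => v :: pvCands N A X n

/-- B's element predicate at bit i: bit i of X clear, bit i of x set, and every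
    set bit of X's low 32 bits above i is set in x. -/
def pvQual (X x : Int) (i : Nat) : Bool :=
  decide (pvXm X / 2 ^ i % 2 = 0) && decide (x / 2 ^ i % 2 = 1) &&
  ((List.range 32).all fun j => decide (i < j → pvXm X / 2 ^ j % 2 = 1 → x / 2 ^ j % 2 = 1))

/-- X's zero bit positions below n, ascending. -/
def pvZs (X : Int) (n : Nat) : List Nat :=
  (List.range n).filter (fun i => decide (pvXm X / 2 ^ i % 2 = 0))

lemma pvXm_eq_emod (X : Int) : pvXm X = X % 4294967296 := by
  unfold pvXm
  by_cases h : 0 ≤ X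
  · rw [PySem.Int.band_of_nonneg h (by norm_num)]
    have h1 : (4294967295 : Int).toNat = 2 ^ 32 - 1 := by rfl
    rw [h1, Nat.and_two_pow_sub_one_eq_mod]
    have h2 : X = (X.toNat : Int) := by omega
    rw [h2]; push_cast; omega
  · simp only [PySem.Int.band, if_neg h, if_pos (by norm_num : (0:Int) ≤ 4294967295)]
    have h1 : (4294967295 : Int).toNat = 2 ^ 32 - 1 := by rfl
    rw [h1, Nat.and_comm, Nat.and_two_pow_sub_one_eq_mod]
    have h2 : ((-X - 1).toNat : Int) = -X - 1 := by omega
    omega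

lemma pvXm_nonneg (X : Int) : 0 ≤ pvXm X := by
  rw [pvXm_eq_emod]; exact Int.emod_nonneg X (by norm_num)

lemma pvXm_lt (X : Int) : pvXm X < 2 ^ 32 := by
  rw [pvXm_eq_emod]; exact Int.emod_lt_of_pos X (by norm_num)

lemma pvHi_32 (X : Int) : pvHi X 32 = 0 := by
  unfold pvHi
  rw [Int.ediv_eq_zero_of_lt (pvXm_nonneg X) (pvXm_lt X)]; ring

/-- Python's `(Y >> i) & 1` is the i-th bit of Y, as floor-division arithmetic. -/
lemma band_shift_one (Y : Int) (i : Nat) :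
    PySem.Int.band (Y >>> i) 1 = Y / 2 ^ i % 2 := by
  rw [PySem.Int.band_one, PySem.Int.mod_eq_emod_of_pos (by norm_num), Int.shiftRight_eq_div_pow]
  push_cast; rfl

/-- For i < 32, bit i of X equals bit i of X's low 32 bits. -/
lemma bit_eq_bit_pvXm (X : Int) (i : Nat) (hi : i < 32) :
    X / 2 ^ i % 2 = pvXm X / 2 ^ i % 2 := by
  rw [pvXm_eq_emod]
  have hM : (4294967296 : Int) = 2 ^ i * 2 ^ (32 - i) := by
    rw [← pow_add]
    have : i + (32 - i) = 32 := by omega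
    rw [this]; norm_num
  have hdef : X % 4294967296 = X + (-(2 ^ (32 - i) * (X / 4294967296))) * 2 ^ i := by
    rw [Int.emod_def]; ring_nf; rw [hM]; ring
  rw [hdef, Int.add_mul_ediv_right _ _ (by positivity : (2:Int) ^ i ≠ 0)]
  have h2 : (2 : Int) ^ (32 - i) = 2 * 2 ^ (31 - i) := by
    have : 32 - i = (31 - i) + 1 := by omega
    rw [this, pow_succ]; ring
  have h5 : X / 2 ^ i + -(2 ^ (32 - i) * (X / 4294967296))
      = X / 2 ^ i + 2 * -(2 ^ (31 - i) * (X / 4294967296)) := by rw [h2]; ring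
  rw [h5, Int.add_mul_emod_self_left]

lemma bit_step (X : Int) (i : Nat) :
    pvXm X / 2 ^ i = 2 * (pvXm X / 2 ^ (i + 1)) + pvXm X / 2 ^ i % 2 := by
  have h : pvXm X / 2 ^ (i + 1) = (pvXm X / 2 ^ i) / 2 := by
    rw [pow_succ, ← Int.ediv_ediv_of_nonneg (by positivity : (0:Int) ≤ 2 ^ i)]
  rw [h]; omega

/-- `curr | (1 << i)` when `curr = pvHi X (i+1)`: disjoint OR is addition. -/
lemma bor_temp (X : Int) (i : Nat) :
    PySem.Int.bor (pvHi X (i + 1)) ((1 : Int) <<< i) = pvHi X (i + 1) + 2 ^ i := by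
  have hq : 0 ≤ pvXm X / 2 ^ (i + 1) := Int.ediv_nonneg (pvXm_nonneg X) (by positivity)
  have h1 : 0 ≤ pvHi X (i + 1) := by unfold pvHi; positivity
  have h2 : (0 : Int) ≤ (1 : Int) <<< i := by rw [Int.shiftLeft_eq]; positivity
  rw [PySem.Int.bor_of_nonneg h1 h2]
  have h3 : ((1 : Int) <<< i).toNat = 2 ^ i := by rw [Int.shiftLeft_eq]; simp; rfl
  have h4 : (pvHi X (i + 1)).toNat = (pvXm X / 2 ^ (i + 1)).toNat <<< (i + 1) := by
    unfold pvHi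
    rw [Nat.shiftLeft_eq]
    have : (2 : Int) ^ (i + 1) * (pvXm X / 2 ^ (i + 1))
        = ((((pvXm X / 2 ^ (i + 1)).toNat) * 2 ^ (i + 1) : Nat) : Int) := by
      push_cast; rw [Int.toNat_of_nonneg hq]; ring
    rw [this, Int.toNat_natCast]
  rw [h3, h4, ← Nat.shiftLeft_add_eq_or_of_lt (Nat.pow_lt_pow_right (by norm_num) (by omega))]
  have h5 : ((((pvXm X / 2 ^ (i + 1)).toNat <<< (i + 1)) + 2 ^ i : Nat) : Int)
      = pvHi X (i + 1) + 2 ^ i := by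
    rw [Nat.shiftLeft_eq]
    push_cast [Int.toNat_of_nonneg hq]
    unfold pvHi; ring
  exact h5

lemma hi_step_one (X : Int) (i : Nat) (h : pvXm X / 2 ^ i % 2 = 1) :
    pvHi X (i + 1) + 2 ^ i = pvHi X i := by
  unfold pvHi; rw [bit_step X i, h]; ring

lemma hi_step_zero (X : Int) (i : Nat) (h : pvXm X / 2 ^ i % 2 = 0) :
    pvHi X i = pvHi X (i + 1) := by
  unfold pvHi; rw [bit_step X i, h]; ring

lemma bit_cases (X : Int) (i : Nat) :
    pvXm X / 2 ^ i % 2 = 0 ∨ pvXm X / 2 ^ i % 2 = 1 := Int.emod_two_eq_zero_or_one _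

/-- A's descending loop, with `curr` tracked by `pvHi`. -/
lemma foldA (N : Int) (A : List Int) (X : Int) :
    ∀ (n : Nat), n ≤ 32 → ∀ (r : Int),
    ((pvDesc n).foldl
      (fun (s : Int × Int) (i : Int) =>
        if PySem.Int.band (X >>> i.toNat) 1 ≠ 0 then
          (s.1, PySem.Int.bor s.2 ((1 : Int) <<< i.toNat))
        else
          let temp := PySem.Int.bor s.2 ((1 : Int) <<< i.toNat)
          let k := (A.filter (fun x => PySem.Int.band x temp = temp)).length
          (min s.1 (N - (k : Int)), s.2))
      (r, pvHi X n))
    = ((pvCands N A X n).foldl min r, pvHi X 0) := by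
  intro n
  induction n with
  | zero => intro _ r; simp [pvDesc, pvCands, pvHi]
  | succ n ih =>
    intro hn r
    rw [show pvDesc (n + 1) = (n : Int) :: pvDesc n from rfl, List.foldl_cons]
    have htn : ((n : Int)).toNat = n := Int.toNat_natCast n
    simp only [htn]
    rw [show (PySem.Int.band (X >>> n) 1) = pvXm X / 2 ^ n % 2 by
      rw [band_shift_one, bit_eq_bit_pvXm X n (by omega)]]
    rcases bit_cases X n with hb | hb
    · -- bit n clear: contributes a candidate, curr unchanged
      rw [hb, if_neg (by omega : ¬ ((0 : Int) ≠ 0))]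
      simp only [bor_temp X n]
      rw [show pvCands N A X (n + 1) = pvVal N A X n :: pvCands N A X n by
        rw [show pvCands N A X (n + 1)
            = (match pvSel N A X n with
               | none => pvCands N A X n
               | some v => v :: pvCands N A X n) from rfl]
        unfold pvSel
        rw [hb, if_neg (by norm_num : ¬ ((0 : Int) = 1))]]
      rw [List.foldl_cons]
      rw [show (N - ((A.filter (fun x =>
            PySem.Int.band x (pvHi X (n + 1) + 2 ^ n) = pvHi X (n + 1) + 2 ^ n)).length : Int))
          = pvVal N A X n from rfl]
      rw [show pvHi X (n + 1) = pvHi X n from (hi_step_zero X n hb).symm]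
      exact ih (by omega) (min r (pvVal N A X n))
    · -- bit n set: no candidate, curr gains bit n
      rw [hb, if_pos (by omega : ((1 : Int) ≠ 0))]
      simp only [bor_temp X n]
      rw [hi_step_one X n hb]
      rw [show pvCands N A X (n + 1) = pvCands N A X n by
        rw [show pvCands N A X (n + 1)
            = (match pvSel N A X n with
               | none => pvCands N A X n
               | some v => v :: pvCands N A X n) from rfl]
        unfold pvSel
        rw [hb, if_pos rfl]]
      exact ih (by omega) r

lemma foldl_min_reverse (l : List Int) (r : Int) :
    l.reverse.foldl min r = l.foldl min r := by
  rw [List.foldl_reverse, List.foldl_eq_foldr]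
  have h : (fun (x y : Int) => min y x) = fun (x y : Int) => min x y := by
    funext x y; exact min_comm y x
  rw [h]

lemma pyRange_down : PySem.List.pyRange 31 (-1) (-1) = pvDesc 32 := by decide

lemma pyRange_up : PySem.List.pyRange 0 32 1 = (List.range 32).map (Nat.cast : Nat → Int) := by decide

/-- A's result is the running min over the candidate list. -/
lemma countA_eq (N : Int) (A : List Int) (X : Int) :
    count N A X = (pvCands N A X 32).foldl min 9223372036854775807 := by
  unfold count
  rw [pyRange_down]
  rw [show ((9223372036854775807 : Int), (0 : Int))
      = ((9223372036854775807 : Int), pvHi X 32) by rw [pvHi_32]]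
  rw [foldA N A X 32 (by omega) 9223372036854775807]

-- ---------- bit-containment characterisation of A's filter predicate ----------

/-- Negation identity for floor-division bits: bit j of -y-1 flips bit j of y. -/
lemma int_bit_neg (y : Int) (j : Nat) :
    (-y - 1) / 2 ^ j % 2 = 1 - y / 2 ^ j % 2 := by
  have hd : (0 : Int) < 2 ^ j := by positivity
  have hq : -y - 1 = (2 ^ j - 1 - y % 2 ^ j) + (-(y / 2 ^ j) - 1) * 2 ^ j := by
    rw [Int.emod_def]; ring
  have hr0 : 0 ≤ y % 2 ^ j := Int.emod_nonneg y (by positivity)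
  have hr1 : y % 2 ^ j < 2 ^ j := Int.emod_lt_of_pos y hd
  rw [hq, Int.add_mul_ediv_right _ _ (by positivity : (2:Int) ^ j ≠ 0),
    Int.ediv_eq_zero_of_lt (by omega) (by omega)]
  omega

/-- Bits of a Nat cast to Int are its testBits. -/
lemma nat_bit_cast (a : Nat) (j : Nat) :
    ((a : Int)) / 2 ^ j % 2 = 1 ↔ a.testBit j = true := by
  rw [Nat.testBit_eq_decide_div_mod_eq]
  have h : ((a : Int)) / 2 ^ j % 2 = ((a / 2 ^ j % 2 : Nat) : Int) := by push_cast; rfl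
  rw [h]
  simp only [decide_eq_true_eq, Nat.cast_eq_one]

/-- Bits of a nonnegative Int are the testBits of its toNat. -/
lemma int_bit_toNat (y : Int) (j : Nat) (hy : 0 ≤ y) :
    y / 2 ^ j % 2 = 1 ↔ y.toNat.testBit j = true := by
  have h := nat_bit_cast y.toNat j
  rwa [Int.toNat_of_nonneg hy] at h

/-- `x & t == t` (t ≥ 0) says every bit of t is set in x — including for negative x. -/
lemma band_superset (x t : Int) (ht : 0 ≤ t) :
    PySem.Int.band x t = t ↔ ∀ j, t.toNat.testBit j = true → x / 2 ^ j % 2 = 1 := by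
  have ht' : (t.toNat : Int) = t := Int.toNat_of_nonneg ht
  by_cases hx : 0 ≤ x
  · rw [PySem.Int.band_of_nonneg hx ht]
    have hx' : (x.toNat : Int) = x := Int.toNat_of_nonneg hx
    constructor
    · intro h j htb
      have heq : x.toNat &&& t.toNat = t.toNat := by omega
      have h' : (x.toNat &&& t.toNat).testBit j = t.toNat.testBit j := by rw [heq]
      rw [Nat.testBit_and, htb, Bool.and_true] at h'
      rw [← hx', nat_bit_cast]
      exact h'
    · intro h
      have heq : x.toNat &&& t.toNat = t.toNat := by
        apply Nat.eq_of_testBit_eq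
        intro j
        rw [Nat.testBit_and]
        cases htb : t.toNat.testBit j with
        | false => simp
        | true =>
          have h2 := h j htb
          rw [← hx', nat_bit_cast] at h2
          simp [h2]
      omega
  · simp only [PySem.Int.band, if_neg hx, if_pos ht]
    set y := (-x - 1).toNat
    have hyv : (y : Int) = -x - 1 := by omega
    have hle : t.toNat &&& y ≤ t.toNat := Nat.and_le_left
    have hbit : ∀ j, x / 2 ^ j % 2 = 1 ↔ y.testBit j = false := by
      intro j
      have hx2 : x = -(y : Int) - 1 := by omega
      rw [hx2, int_bit_neg (y : Int) j]
      have h2 := nat_bit_cast y j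
      rcases Int.emod_two_eq_zero_or_one ((y : Int) / 2 ^ j) with h | h
      · rw [h]
        constructor
        · intro _
          cases hb : y.testBit j with
          | false => rfl
          | true => exact absurd (h2.2 hb) (by omega)
        · intro _; omega
      · rw [h]
        constructor
        · intro hh; omega
        · intro hb
          rw [h2.1 h] at hb
          exact Bool.noConfusion hb
    constructor
    · intro h j htb
      have heq : t.toNat &&& y = 0 := by omega
      rw [hbit j]
      have h' : (t.toNat &&& y).testBit j = Nat.testBit 0 j := by rw [heq]
      rw [Nat.testBit_and, htb, Bool.true_and, Nat.zero_testBit] at h'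
      exact h'
    · intro h
      have heq : t.toNat &&& y = 0 := by
        apply Nat.eq_of_testBit_eq
        intro j
        rw [Nat.testBit_and, Nat.zero_testBit]
        cases htb : t.toNat.testBit j with
        | false => simp
        | true => simp [(hbit j).1 (h j htb)]
      omega

lemma pvTemp_toNat (X : Int) (i : Nat) :
    (pvTemp X i).toNat = 2 ^ (i + 1) * ((pvXm X).toNat / 2 ^ (i + 1)) + 2 ^ i := by
  have ha : ((pvXm X).toNat : Int) = pvXm X := Int.toNat_of_nonneg (pvXm_nonneg X)
  have h : pvTemp X i
      = ((2 ^ (i + 1) * ((pvXm X).toNat / 2 ^ (i + 1)) + 2 ^ i : Nat) : Int) := by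
    unfold pvTemp pvHi
    push_cast
    rw [ha]
  rw [h, Int.toNat_natCast]

/-- The bits of the mask tested at position i: bit i itself, and X's low-32 bits above i. -/
lemma pvTemp_testBit (X : Int) (i j : Nat) :
    (pvTemp X i).toNat.testBit j = true ↔
      (j = i ∨ (i < j ∧ (pvXm X).toNat.testBit j = true)) := by
  rw [pvTemp_toNat]
  rw [Nat.testBit_two_pow_mul_add _ (by
    exact Nat.pow_lt_pow_right (by norm_num) (Nat.lt_succ_self i))]
  by_cases hj : j < i + 1
  · rw [if_pos hj, Nat.testBit_two_pow]
    constructor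
    · intro h; left; exact (of_decide_eq_true h).symm
    · rintro (h | h)
      · simp [h]
      · omega
  · rw [if_neg hj, Nat.testBit_div_two_pow]
    have hji : j - (i + 1) + (i + 1) = j := by omega
    rw [hji]
    constructor
    · intro h; right; exact ⟨by omega, h⟩
    · rintro (h | h)
      · omega
      · exact h.2

/-- A's mask test at a zero bit i of X, as B's bitwise condition. -/
lemma band_temp_iff (X x : Int) (i : Nat) :
    PySem.Int.band x (pvTemp X i) = pvTemp X i ↔
      (x / 2 ^ i % 2 = 1 ∧
        ∀ j, j < 32 → i < j → pvXm X / 2 ^ j % 2 = 1 → x / 2 ^ j % 2 = 1) := by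
  have htemp : 0 ≤ pvTemp X i := by
    unfold pvTemp pvHi
    have hq : 0 ≤ pvXm X / 2 ^ (i + 1) := Int.ediv_nonneg (pvXm_nonneg X) (by positivity)
    positivity
  rw [band_superset x (pvTemp X i) htemp]
  have hXmbit : ∀ j, (pvXm X).toNat.testBit j = true ↔ pvXm X / 2 ^ j % 2 = 1 := by
    intro j; exact (int_bit_toNat (pvXm X) j (pvXm_nonneg X)).symm
  have hXmhigh : ∀ j, 32 ≤ j → (pvXm X).toNat.testBit j = false := by
    intro j hj
    apply Nat.testBit_lt_two_pow
    calc (pvXm X).toNat < 2 ^ 32 := by have := pvXm_lt X; omega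
    _ ≤ 2 ^ j := Nat.pow_le_pow_right (by norm_num) hj
  constructor
  · intro h
    refine ⟨h i ((pvTemp_testBit X i i).2 (Or.inl rfl)), ?_⟩
    intro j _ hij hb
    exact h j ((pvTemp_testBit X i j).2 (Or.inr ⟨hij, (hXmbit j).2 hb⟩))
  · rintro ⟨h1, h2⟩ j hj
    rcases (pvTemp_testBit X i j).1 hj with rfl | ⟨hij, hb⟩
    · exact h1
    · have hj32 : j < 32 := by
        by_contra hc
        rw [hXmhigh j (by omega)] at hb
        exact absurd hb (by simp)
      exact h2 j hj32 hij ((hXmbit j).1 hb)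

lemma pvQual_iff (X x : Int) (i : Nat) :
    pvQual X x i = true ↔ (pvXm X / 2 ^ i % 2 = 0 ∧ x / 2 ^ i % 2 = 1 ∧
      ∀ j, j < 32 → i < j → pvXm X / 2 ^ j % 2 = 1 → x / 2 ^ j % 2 = 1) := by
  unfold pvQual
  simp only [Bool.and_eq_true, decide_eq_true_eq, List.all_eq_true, List.mem_range]
  tauto

-- ---------- B's element-major pass ----------

lemma goBit_spec (X x : Int) :
    ∀ (n : Nat), n ≤ 32 →
    (∀ j, n ≤ j → j < 32 → pvXm X / 2 ^ j % 2 = 1 → x / 2 ^ j % 2 = 1) →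
    ∀ (c : List Int), c.length = 32 →
    (goBit X x n c).length = 32 ∧
    ∀ i, i < 32 → (goBit X x n c).getD i 0
      = c.getD i 0 + (if i < n ∧ pvQual X x i = true then 1 else 0) := by
  intro n
  induction n with
  | zero =>
    intro _ _ c hc
    refine ⟨hc, ?_⟩
    intro i _
    simp [goBit]
  | succ n ih =>
    intro hn hall c hc
    have hn32 : n < 32 := by omega
    have hXbit : PySem.Int.band (X >>> n) 1 = pvXm X / 2 ^ n % 2 := by
      rw [band_shift_one, bit_eq_bit_pvXm X n hn32]
    have hxbit : PySem.Int.band (x >>> n) 1 = x / 2 ^ n % 2 := band_shift_one x n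
    have hx01 : x / 2 ^ n % 2 = 0 ∨ x / 2 ^ n % 2 = 1 := Int.emod_two_eq_zero_or_one _
    rw [show goBit X x (n + 1) c
        = (if PySem.Int.band (X >>> n) 1 ≠ 0 then
            if PySem.Int.band (x >>> n) 1 = 0 then c
            else goBit X x n c
          else if PySem.Int.band (x >>> n) 1 ≠ 0 then
            goBit X x n (c.set n (c.getD n 0 + 1))
          else goBit X x n c) from rfl]
    rw [hXbit, hxbit]
    rcases bit_cases X n with hXb | hXb
    · -- bit n of X clear
      rw [hXb, if_neg (by omega : ¬ ((0 : Int) ≠ 0))]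
      have hall' : ∀ j, n ≤ j → j < 32 → pvXm X / 2 ^ j % 2 = 1 → x / 2 ^ j % 2 = 1 := by
        intro j hj hj32 hb
        rcases Nat.eq_or_lt_of_le hj with rfl | hj'
        · rw [hXb] at hb; omega
        · exact hall j (by omega) hj32 hb
      rcases hx01 with hxb | hxb
      · -- bit n of x clear: no increment
        rw [hxb, if_neg (by omega : ¬ ((0 : Int) ≠ 0))]
        obtain ⟨hl, hg⟩ := ih (by omega) hall' c hc
        refine ⟨hl, ?_⟩
        intro i hi
        rw [hg i hi]
        congr 1
        by_cases hin : i < n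
        · by_cases hq : pvQual X x i = true
          · rw [if_pos ⟨hin, hq⟩, if_pos ⟨Nat.lt_succ_of_lt hin, hq⟩]
          · rw [if_neg (fun h => hq h.2), if_neg (fun h => hq h.2)]
        · by_cases hin' : i < n + 1
          · have hieq : i = n := by omega
            subst hieq
            have hnq : ¬ pvQual X x i = true := by
              rw [pvQual_iff]
              rintro ⟨_, h2, _⟩; omega
            rw [if_neg (fun h => hnq h.2), if_neg (fun h => hnq h.2)]
          · rw [if_neg (fun h => hin h.1), if_neg (fun h => hin' h.1)]
      · -- bit n of x set: increment counts[n]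
        rw [hxb, if_pos (by omega : ((1 : Int) ≠ 0))]
        have hc' : (c.set n (c.getD n 0 + 1)).length = 32 := by
          rw [List.length_set]; exact hc
        obtain ⟨hl, hg⟩ := ih (by omega) hall' (c.set n (c.getD n 0 + 1)) hc'
        refine ⟨hl, ?_⟩
        intro i hi
        rw [hg i hi]
        have hset : (c.set n (c.getD n 0 + 1)).getD i 0
            = if i = n then c.getD n 0 + 1 else c.getD i 0 := by
          simp only [List.getD_eq_getElem?_getD, List.getElem?_set, hc]
          by_cases hin : n = i
          · subst hin
            rw [if_pos rfl, if_pos rfl, if_pos (by omega : n < 32)]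
            simp
          · rw [if_neg hin, if_neg (fun h => hin h.symm)]
        rw [hset]
        by_cases hin : i = n
        · subst hin
          have hq : pvQual X x i = true := by
            rw [pvQual_iff]
            exact ⟨hXb, hxb, fun j hj32 hij hb => hall' j (by omega) hj32 hb⟩
          rw [if_pos rfl, if_neg (fun h => absurd h.1 (lt_irrefl i)),
            if_pos ⟨Nat.lt_succ_self i, hq⟩]
          ring
        · rw [if_neg hin]
          congr 1
          by_cases hin' : i < n
          · by_cases hq : pvQual X x i = true
            · rw [if_pos ⟨hin', hq⟩, if_pos ⟨Nat.lt_succ_of_lt hin', hq⟩]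
            · rw [if_neg (fun h => hq h.2), if_neg (fun h => hq h.2)]
          · have h1 : ¬ (i < n ∧ pvQual X x i = true) := fun h => hin' h.1
            have h2 : ¬ (i < n + 1 ∧ pvQual X x i = true) := by
              rintro ⟨ha, hb⟩; exact hin (by omega)
            rw [if_neg h1, if_neg h2]
    · -- bit n of X set
      rw [hXb, if_pos (by omega : ((1 : Int) ≠ 0))]
      rcases hx01 with hxb | hxb
      · -- required bit missing in x: break
        rw [hxb, if_pos rfl]
        refine ⟨hc, ?_⟩
        intro i hi
        have hno : ¬ (i < n + 1 ∧ pvQual X x i = true) := by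
          rintro ⟨hin, hq⟩
          rw [pvQual_iff] at hq
          obtain ⟨q1, q2, q3⟩ := hq
          by_cases hieq : i = n
          · subst hieq; omega
          · have := q3 n hn32 (by omega) hXb
            omega
        rw [if_neg hno, add_zero]
      · -- required bit present: continue
        rw [hxb, if_neg (by omega : ¬ ((1 : Int) = 0))]
        have hall' : ∀ j, n ≤ j → j < 32 → pvXm X / 2 ^ j % 2 = 1 → x / 2 ^ j % 2 = 1 := by
          intro j hj hj32 hb
          rcases Nat.eq_or_lt_of_le hj with rfl | hj'
          · exact hxb
          · exact hall j (by omega) hj32 hb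
        obtain ⟨hl, hg⟩ := ih (by omega) hall' c hc
        refine ⟨hl, ?_⟩
        intro i hi
        rw [hg i hi]
        congr 1
        by_cases hin : i < n
        · by_cases hq : pvQual X x i = true
          · rw [if_pos ⟨hin, hq⟩, if_pos ⟨Nat.lt_succ_of_lt hin, hq⟩]
          · rw [if_neg (fun h => hq h.2), if_neg (fun h => hq h.2)]
        · have h1 : ¬ (i < n ∧ pvQual X x i = true) := fun h => hin h.1
          have h2 : ¬ (i < n + 1 ∧ pvQual X x i = true) := by
            rintro ⟨hin', hq⟩
            have hieq : i = n := by omega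
            subst hieq
            rw [pvQual_iff] at hq
            obtain ⟨q1, _, _⟩ := hq
            omega
          rw [if_neg h1, if_neg h2]

/-- After the element-major pass, counter i holds the number of qualifying elements. -/
lemma counts_spec (X : Int) :
    ∀ (A : List Int) (c : List Int), c.length = 32 →
    (A.foldl (fun c x => goBit X x 32 c) c).length = 32 ∧
    ∀ i, i < 32 → (A.foldl (fun c x => goBit X x 32 c) c).getD i 0
      = c.getD i 0 + (A.countP (fun x => pvQual X x i) : Int) := by
  intro A
  induction A with
  | nil =>
    intro c hc
    exact ⟨hc, fun i _ => by simp⟩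
  | cons a l ih =>
    intro c hc
    obtain ⟨hl1, hg1⟩ := goBit_spec X a 32 (le_refl 32) (fun j hj hj32 _ => by omega) c hc
    obtain ⟨hl2, hg2⟩ := ih (goBit X a 32 c) hl1
    refine ⟨by simpa using hl2, ?_⟩
    intro i hi
    rw [List.foldl_cons, hg2 i hi, hg1 i hi, List.countP_cons]
    by_cases hq : pvQual X a i = true
    · rw [if_pos ⟨hi, hq⟩, if_pos hq]
      push_cast; ring
    · rw [if_neg (fun h => hq h.2), if_neg hq]
      push_cast; ring

/-- At a zero bit i of X, the counter equals A's filter count. -/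
lemma countP_eq_filter (A : List Int) (X : Int) (i : Nat) :
    (A.countP (fun x => pvQual X x i) : Int)
      = ((A.filter (fun x => PySem.Int.band x (pvTemp X i) = pvTemp X i)).length : Int)
      ∨ ¬ (pvXm X / 2 ^ i % 2 = 0) := by
  by_cases hb : pvXm X / 2 ^ i % 2 = 0
  · left
    congr 1
    rw [← List.countP_eq_length_filter]
    apply List.countP_congr
    intro x _
    rw [pvQual_iff, decide_eq_true_eq, band_temp_iff]
    constructor
    · rintro ⟨_, h2, h3⟩; exact ⟨h2, h3⟩
    · rintro ⟨h2, h3⟩; exact ⟨hb, h2, h3⟩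
  · right; exact hb

/-- The candidate list is the reversed value list over X's ascending zero bits. -/
lemma pvCands_eq_zs (N : Int) (A : List Int) (X : Int) :
    ∀ n, pvCands N A X n = ((pvZs X n).map (pvVal N A X)).reverse := by
  intro n
  induction n with
  | zero => simp [pvCands, pvZs]
  | succ n ih =>
    unfold pvZs
    rw [List.range_succ, List.filter_append, List.map_append, List.reverse_append]
    rw [show pvCands N A X (n + 1)
        = (match pvSel N A X n with
           | none => pvCands N A X n
           | some v => v :: pvCands N A X n) from rfl]
    unfold pvSel
    rcases bit_cases X n with hb | hb
    · rw [hb, if_neg (by norm_num : ¬ ((0 : Int) = 1))]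
      have hf : List.filter (fun i => decide (pvXm X / 2 ^ i % 2 = 0)) [n] = [n] := by
        rw [List.filter_cons, if_pos (decide_eq_true hb), List.filter_nil]
      rw [hf, List.map_cons, List.map_nil, List.reverse_cons, List.reverse_nil,
        List.nil_append, List.singleton_append]
      unfold pvZs at ih
      rw [ih]
    · rw [hb, if_pos rfl]
      have hf : List.filter (fun i => decide (pvXm X / 2 ^ i % 2 = 0)) [n] = [] := by
        rw [List.filter_cons, if_neg (by
          intro h
          rw [decide_eq_true_eq] at h
          omega), List.filter_nil]
      rw [hf, List.map_nil, List.reverse_nil, List.nil_append]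
      unfold pvZs at ih
      rw [ih]

-- ---------- min/max bridging ----------

lemma minmax (N : Int) (l : List Int) :
    ∀ (m : Int), l.foldl (fun a b => min a (N - b)) (N - m)
      = N - l.foldl max m := by
  induction l with
  | nil => intro m; rfl
  | cons a l ih =>
    intro m
    rw [List.foldl_cons, List.foldl_cons]
    have h : min (N - m) (N - a) = N - max m a := by
      rw [min_def, max_def]; split_ifs <;> omega
    rw [h, ih]

-- ===== VERDICT (by name: the statement is the Claim_ definition above) =====
theorem count_spec : Claim_equal_count := by
  intro N A X hdom
  show count N A X = count_alt N A X
  have hN : N ≤ 2147483648 := by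
    unfold Dom_count at hdom
    simp only [Bool.and_eq_true, pvDomInt, decide_eq_true_eq] at hdom
    exact hdom.1.1.2
  rw [countA_eq, pvCands_eq_zs, foldl_min_reverse]
  unfold count_alt
  obtain ⟨hclen, hcget⟩ := counts_spec X A (List.replicate 32 (0 : Int)) (by simp)
  have hrep : ∀ n : Nat, (List.replicate 32 (0 : Int)).getD n 0 = 0 := by
    intro n
    rw [List.getD_eq_getElem?_getD, List.getElem?_replicate]
    split <;> rfl
  -- identify B's zero-bit list with pvZs X 32
  have hzs : (PySem.List.pyRange 0 32 1).filter
        (fun i => PySem.Int.band (X >>> i.toNat) 1 = 0)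
      = (pvZs X 32).map (Nat.cast : Nat → Int) := by
    rw [pyRange_up]
    unfold pvZs
    rw [List.filter_map]
    apply congrArg
    apply List.filter_congr
    intro n hn
    have hn32 : n < 32 := List.mem_range.1 hn
    simp only [Function.comp_apply]
    rw [decide_eq_decide, Int.toNat_natCast, Int.shiftRight_natCast_right, band_shift_one, bit_eq_bit_pvXm X n hn32]
  rw [hzs]
  -- counter value at each zero bit
  have hcnt : ∀ n ∈ pvZs X 32,
      (A.foldl (fun c x => goBit X x 32 c) (List.replicate 32 (0 : Int))).getD n 0
        = ((A.filter (fun x => PySem.Int.band x (pvTemp X n) = pvTemp X n)).length : Int) := by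
    intro n hn
    unfold pvZs at hn
    rw [List.mem_filter, List.mem_range] at hn
    obtain ⟨hn32, hnb⟩ := hn
    rw [decide_eq_true_eq] at hnb
    rcases countP_eq_filter A X n with h | h
    · rw [hcget n hn32, hrep n, zero_add, h]
    · exact absurd hnb h
  cases hZ : pvZs X 32 with
  | nil => simp
  | cons n0 ns =>
    have hne : (n0 :: ns).map (Nat.cast : Nat → Int) ≠ [] := by simp
    rw [if_neg (by simp)]
    have hmm : ((n0 :: ns).map (Nat.cast : Nat → Int)).map
          (fun i => (A.foldl (fun c x => goBit X x 32 c)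
            (List.replicate 32 (0 : Int))).getD i.toNat 0)
        = (n0 :: ns).map (fun n =>
            ((A.filter (fun x => PySem.Int.band x (pvTemp X n) = pvTemp X n)).length : Int)) := by
      rw [List.map_map]
      apply List.map_congr_left
      intro n hn
      show (A.foldl (fun c x => goBit X x 32 c)
          (List.replicate 32 (0 : Int))).getD ((Nat.cast n : Int)).toNat 0
        = ((A.filter (fun x => PySem.Int.band x (pvTemp X n) = pvTemp X n)).length : Int)
      rw [Int.toNat_natCast]
      exact hcnt n (hZ ▸ hn)
    rw [hmm, List.map_cons, List.map_cons, PySem.List.max?_id_cons]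
    rw [show List.map (pvVal N A X) ns
        = (ns.map (fun n =>
            ((A.filter (fun x => PySem.Int.band x (pvTemp X n) = pvTemp X n)).length : Int))).map
            (fun k => N - k) by
      rw [List.map_map]; rfl]
    rw [List.foldl_cons]
    rw [show min (9223372036854775807 : Int) (pvVal N A X n0) = pvVal N A X n0 from
      min_eq_right (by
        have hnn : (0 : Int)
            ≤ ((A.filter (fun x => PySem.Int.band x (pvTemp X n0) = pvTemp X n0)).length : Int) := by
          positivity
        unfold pvVal; omega)]
    rw [show pvVal N A X n0
        = N - ((A.filter (fun x => PySem.Int.band x (pvTemp X n0) = pvTemp X n0)).length : Int)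
      from rfl]
    rw [List.foldl_map, minmax]
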